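-- pv_equiv track=rewrite | github.com/SECURIoTESIGN/SAM-Modules | Threat Modeling Solution (TMS)/logic_TMS.py | order_by_top_n
-- ===== SOURCE A (Python) =====
-- top_n_vulnerabilities = ["CWE-79", "CWE-787", "CWE-20", "CWE-125", "CWE-119", "CWE-89", "CWE-200", "CWE-416", "CWE-352", "CWE-78", "CWE-190", "CWE-22", "CWE-476", "CWE-287", "CWE-434", "CWE-732", "CWE-94", "CWE-522", "CWE-611", "CWE-798", "CWE-502", "CWE-269", "CWE-400", "CWE-306", "CWE-862", "CWE-98", "CWE-170", "CWE-252", "CWE-327", "CWE-330", "CWE-404", "CWE-441", "CWE-479", "CWE-573", "CWE-625", "CWE-705", "CWE-758", "CWE-778", "CWE-1244", "CWE-1247", "CWE-1274", "CWE-1281", "CWE-1295", "CWE-1296", "CWE-1299"]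
--
-- def order_by_top_n(recm_list):
--     top_recm_list = []
--     bot_recm_list = []
--     for recm in recm_list:
--         if recm in top_n_vulnerabilities:
--             top_recm_list.append(recm)
--         else:
--             bot_recm_list.append(recm)
--
--     return (top_recm_list + bot_recm_list)
-- ===== SOURCE B (Python) =====
-- top_n_vulnerabilities = ("CWE-79 CWE-787 CWE-20 CWE-125 CWE-119 CWE-89 CWE-200 CWE-416 "
--                          "CWE-352 CWE-78 CWE-190 CWE-22 CWE-476 CWE-287 CWE-434 CWE-732 "
--                          "CWE-94 CWE-522 CWE-611 CWE-798 CWE-502 CWE-269 CWE-400 CWE-306 "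
--                          "CWE-862 CWE-98 CWE-170 CWE-252 CWE-327 CWE-330 CWE-404 CWE-441 "
--                          "CWE-479 CWE-573 CWE-625 CWE-705 CWE-758 CWE-778 CWE-1244 CWE-1247 "
--                          "CWE-1274 CWE-1281 CWE-1295 CWE-1296 CWE-1299").split()
--
-- def order_by_top_n(recm_list):
--     top = set(top_n_vulnerabilities)
--     return sorted(recm_list, key=lambda recm: recm not in top)
-- ===== Notes on version B (the rewrite author's own statement) =====
-- stated objective: idiomatic
-- what changed: Replaces the explicit two-accumulator partition-and-concatenate loop with a single stable sort by the boolean key 'not in top set' (the top-N list built by splitting one string, membership via a set); sort stability keeps each group's original order, matching A exactly.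
import Mathlib
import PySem

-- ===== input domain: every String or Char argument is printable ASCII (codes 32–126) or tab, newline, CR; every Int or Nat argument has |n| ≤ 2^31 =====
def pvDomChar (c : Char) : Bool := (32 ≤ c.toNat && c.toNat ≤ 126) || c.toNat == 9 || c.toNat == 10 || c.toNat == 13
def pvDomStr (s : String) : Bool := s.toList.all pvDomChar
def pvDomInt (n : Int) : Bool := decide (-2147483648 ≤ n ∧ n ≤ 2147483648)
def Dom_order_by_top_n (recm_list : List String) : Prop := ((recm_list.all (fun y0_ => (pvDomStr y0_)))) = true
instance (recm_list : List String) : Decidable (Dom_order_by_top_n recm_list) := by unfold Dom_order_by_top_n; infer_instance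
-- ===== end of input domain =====

-- B replaces A's two-accumulator partition loop with one stable sort by a 0/1 "not in top set" key (idiomatic; same return value).

-- ===== PORT A =====
-- A's module constant: a literal list of 45 strings
def top_n_vulnerabilities : List String := ["CWE-79", "CWE-787", "CWE-20", "CWE-125", "CWE-119", "CWE-89", "CWE-200", "CWE-416", "CWE-352", "CWE-78", "CWE-190", "CWE-22", "CWE-476", "CWE-287", "CWE-434", "CWE-732", "CWE-94", "CWE-522", "CWE-611", "CWE-798", "CWE-502", "CWE-269", "CWE-400", "CWE-306", "CWE-862", "CWE-98", "CWE-170", "CWE-252", "CWE-327", "CWE-330", "CWE-404", "CWE-441", "CWE-479", "CWE-573", "CWE-625", "CWE-705", "CWE-758", "CWE-778", "CWE-1244", "CWE-1247", "CWE-1274", "CWE-1281", "CWE-1295", "CWE-1296", "CWE-1299"]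

-- the loop keeps two accumulators (top_recm_list, bot_recm_list) and appends each recm to one of them
def order_by_top_n (recm_list : List String) : List String :=
  let p := recm_list.foldl
    (fun (acc : List String × List String) recm =>
      if recm ∈ top_n_vulnerabilities then (acc.1 ++ [recm], acc.2)
      else (acc.1, acc.2 ++ [recm]))
    ([], [])
  p.1 ++ p.2

-- ===== PORT B =====
-- Source B's module constant: ONE whitespace-separated string, .split() at module load
def top_n_vulnerabilities_b : List String :=
  PySem.Str.split₀ "CWE-79 CWE-787 CWE-20 CWE-125 CWE-119 CWE-89 CWE-200 CWE-416 CWE-352 CWE-78 CWE-190 CWE-22 CWE-476 CWE-287 CWE-434 CWE-732 CWE-94 CWE-522 CWE-611 CWE-798 CWE-502 CWE-269 CWE-400 CWE-306 CWE-862 CWE-98 CWE-170 CWE-252 CWE-327 CWE-330 CWE-404 CWE-441 CWE-479 CWE-573 CWE-625 CWE-705 CWE-758 CWE-778 CWE-1244 CWE-1247 CWE-1274 CWE-1281 CWE-1295 CWE-1296 CWE-1299"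

-- Source B: top = set(top_n_vulnerabilities); sorted(recm_list, key=lambda recm: recm not in top)
-- Python's False/True key values are ported as the Ints 0/1 (Python compares bools as these ints).
def order_by_top_n_alt (recm_list : List String) : List String :=
  let top := PySem.Set.ofList top_n_vulnerabilities_b
  PySem.List.sorted recm_list (fun recm => if recm ∈ top then (0 : Int) else 1) false

-- ===== PRECONDITION & SPEC =====
def Spec_order_by_top_n (recm_list : List String) (out : List String) : Prop := out = order_by_top_n_alt recm_list
instance (recm_list : List String) (out : List String) : Decidable (Spec_order_by_top_n recm_list out) := by unfold Spec_order_by_top_n; infer_instance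

-- ===== CLAIM (what is proved, stated in full; the proofs are below) =====
def Claim_equal_order_by_top_n : Prop := ∀ (recm_list : List String), Dom_order_by_top_n recm_list → Spec_order_by_top_n recm_list (order_by_top_n recm_list)

-- ===== LEMMAS AND PROOFS =====

-- splitting B's single string yields exactly A's literal list
set_option maxRecDepth 8192 in
theorem top_b_eq : top_n_vulnerabilities_b = top_n_vulnerabilities := by decide

-- the two-valued sort key used by B
def pvKey (x : String) : Int := if x ∈ PySem.Set.ofList top_n_vulnerabilities_b then 0 else 1

theorem pvKey_mem {x : String} (h : x ∈ top_n_vulnerabilities) : pvKey x = 0 := by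
  simp [pvKey, PySem.Set.mem_ofList, top_b_eq, h]

theorem pvKey_not_mem {x : String} (h : x ∉ top_n_vulnerabilities) : pvKey x = 1 := by
  simp [pvKey, PySem.Set.mem_ofList, top_b_eq, h]

-- stable insertion of a key-0 element: it lands after all key-0 elements, before all key-1 elements
theorem insertBy_partition (x : String) (A B : List String)
    (hA : ∀ a ∈ A, pvKey a = 0) (hB : ∀ b ∈ B, pvKey b = 1) (hx : pvKey x = 0) :
    PySem.List.insertBy (fun a b => decide (pvKey a < pvKey b)) x (A ++ B) = A ++ x :: B := by
  induction A with
  | nil =>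
    cases B with
    | nil => simp [PySem.List.insertBy]
    | cons b B' =>
      have hb := hB b (by simp)
      simp [PySem.List.insertBy, hx, hb]
  | cons a A' ih =>
    have ha := hA a (by simp)
    simp only [List.cons_append, PySem.List.insertBy, hx, ha]
    simp only [show ¬((0:Int) < 0) by omega, decide_false, Bool.false_eq_true, if_false]
    rw [ih (fun y hy => hA y (List.mem_cons_of_mem a hy))]

-- insertion of a key-1 element: it lands at the very end
theorem insertBy_last (x : String) (L : List String) (hx : pvKey x = 1)
    (hL : ∀ y ∈ L, pvKey y = 0 ∨ pvKey y = 1) :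
    PySem.List.insertBy (fun a b => decide (pvKey a < pvKey b)) x L = L ++ [x] := by
  apply PySem.List.insertBy_of_forall_not_before
  intro y hy
  rcases hL y hy with h | h <;> simp [hx, h]

-- B's stable sort is exactly the partition: key-0 elements first, then key-1 elements, orders preserved
theorem sorted_eq_partition (xs : List String) :
    PySem.List.sorted xs pvKey false =
      xs.filter (fun x => decide (x ∈ top_n_vulnerabilities)) ++
      xs.filter (fun x => !decide (x ∈ top_n_vulnerabilities)) := by
  induction xs using List.reverseRecOn with
  | nil => simp [PySem.List.sorted]
  | append_singleton xs x ih =>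
    rw [PySem.List.sorted_eq_foldl_insertBy] at ih ⊢
    rw [List.foldl_append, List.foldl_cons, List.foldl_nil, ih]
    by_cases hx : x ∈ top_n_vulnerabilities
    · rw [insertBy_partition x _ _
        (by intro a ha; simp only [List.mem_filter, decide_eq_true_eq] at ha; exact pvKey_mem ha.2)
        (by intro b hb; simp only [List.mem_filter, Bool.not_eq_eq_eq_not, Bool.not_true,
              decide_eq_false_iff_not] at hb; exact pvKey_not_mem hb.2)
        (pvKey_mem hx)]
      simp [List.filter_append, hx]
    · rw [insertBy_last x _ (pvKey_not_mem hx)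
        (by intro y _; by_cases h : y ∈ top_n_vulnerabilities
            · exact Or.inl (pvKey_mem h)
            · exact Or.inr (pvKey_not_mem h))]
      simp [List.filter_append, hx]

-- A's loop invariant: the pair accumulator is (a ++ in-top filter, b ++ out-of-top filter)
theorem foldl_partition (xs : List String) (a b : List String) :
    xs.foldl
      (fun (acc : List String × List String) recm =>
        if recm ∈ top_n_vulnerabilities then (acc.1 ++ [recm], acc.2)
        else (acc.1, acc.2 ++ [recm]))
      (a, b) =
    (a ++ xs.filter (fun x => decide (x ∈ top_n_vulnerabilities)),
     b ++ xs.filter (fun x => !decide (x ∈ top_n_vulnerabilities))) := by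
  induction xs generalizing a b with
  | nil => simp
  | cons x xs ih =>
    by_cases hx : x ∈ top_n_vulnerabilities <;>
      simp [List.foldl_cons, hx, ih]

-- ===== VERDICT (by name: the statement is the Claim_ definition above) =====
theorem order_by_top_n_spec : Claim_equal_order_by_top_n := by
  intro recm_list _
  unfold Spec_order_by_top_n order_by_top_n order_by_top_n_alt
  show _ = PySem.List.sorted recm_list pvKey false
  rw [sorted_eq_partition, foldl_partition]
  simp
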